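-- pv_equiv track=rewrite | github.com/kamil157/aoc | 2017/day21.py | make_rules
-- ===== SOURCE A (Python) =====
-- def rotate(grid):
--     return ["".join(l) for l in zip(*grid[::-1])]
--
-- def flip(grid):
--     return [line[::-1] for line in grid]
--
-- def make_rules(grid):
--     keys = []
--     for _ in range(4):
--         grid = rotate(grid)
--         keys.append(grid)
--     grid = flip(grid)
--     for _ in range(4):
--         grid = rotate(grid)
--         keys.append(grid)
--     return keys
-- ===== SOURCE B (Python) =====
-- def make_rules(grid):
--     # R90 of grid (zip truncates ragged rows exactly like the original's rotate)
--     r = ["".join(t) for t in zip(*grid[::-1])]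
--     # the remaining 7 variants, each by a direct closed-form transform of r
--     r90 = ["".join(t) for t in zip(*r[::-1])]
--     r180 = [row[::-1] for row in r[::-1]]
--     r270 = ["".join(t) for t in zip(*r)][::-1]
--     f = [row[::-1] for row in r270]
--     f90 = ["".join(t) for t in zip(*f[::-1])]
--     f180 = [row[::-1] for row in f[::-1]]
--     f270 = ["".join(t) for t in zip(*f)][::-1]
--     return [r, r90, r180, r270, f90, f180, f270, f]
-- ===== Notes on version B (the rewrite author's own statement) =====
-- stated objective: alternative
-- what changed: Replaces the stateful range(4) rotate-and-append loops by computing each of the 8 variants independently with closed-form transforms (rot180 = reverse rows and columns, rot270 = transpose then reverse) of the once-rotated grid.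
import Mathlib
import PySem

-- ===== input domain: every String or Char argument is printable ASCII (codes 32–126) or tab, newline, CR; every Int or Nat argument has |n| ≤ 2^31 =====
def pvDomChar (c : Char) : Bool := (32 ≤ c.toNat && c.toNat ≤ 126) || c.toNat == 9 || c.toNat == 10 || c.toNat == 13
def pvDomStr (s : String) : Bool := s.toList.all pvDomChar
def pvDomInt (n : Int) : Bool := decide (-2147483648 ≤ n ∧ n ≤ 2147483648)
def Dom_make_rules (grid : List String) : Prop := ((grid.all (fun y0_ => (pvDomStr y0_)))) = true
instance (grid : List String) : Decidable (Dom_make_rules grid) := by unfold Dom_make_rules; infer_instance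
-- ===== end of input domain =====

-- B computes each of the 8 variants by a direct closed-form transform of the once-rotated
-- grid instead of A's two stateful range(4) rotate-and-append loops; same asymptotic cost.

-- ===== PORT A =====
-- Python zip(*rows): truncating transpose; exact — the result has min-row-length rows and
-- row i holds the i-th element of every input row (getD is safe there: i < every length).
def pvMinLen (rows : List (List Char)) : Nat :=
  match rows with
  | [] => 0
  | r :: rs => rs.foldl (fun m l => min m l.length) r.length

def pvZip (rows : List (List Char)) : List (List Char) :=
  (List.range (pvMinLen rows)).map (fun i => rows.map (fun l => l.getD i ' '))

-- rotate(grid) = ["".join(l) for l in zip(*grid[::-1])]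
def rotateA (grid : List String) : List String :=
  (pvZip ((grid.reverse).map String.toList)).map String.ofList

-- flip(grid) = [line[::-1] for line in grid]
def flipA (grid : List String) : List String :=
  grid.map (fun line => String.ofList line.toList.reverse)

def make_rules (grid : List String) : List (List String) :=
  let s1 := (List.range 4).foldl
    (fun (s : List String × List (List String)) _ =>
      let g := rotateA s.1; (g, s.2 ++ [g])) (grid, [])
  let g2 := flipA s1.1
  let s2 := (List.range 4).foldl
    (fun (s : List String × List (List String)) _ =>
      let g := rotateA s.1; (g, s.2 ++ [g])) (g2, s1.2)
  s2.2

-- ===== PORT B =====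
def make_rules_alt (grid : List String) : List (List String) :=
  let r := (pvZip ((grid.reverse).map String.toList)).map String.ofList
  let r90 := (pvZip ((r.reverse).map String.toList)).map String.ofList
  let r180 := (r.reverse).map (fun row => String.ofList row.toList.reverse)
  let r270 := ((pvZip (r.map String.toList)).map String.ofList).reverse
  let f := r270.map (fun row => String.ofList row.toList.reverse)
  let f90 := (pvZip ((f.reverse).map String.toList)).map String.ofList
  let f180 := (f.reverse).map (fun row => String.ofList row.toList.reverse)
  let f270 := ((pvZip (f.map String.toList)).map String.ofList).reverse
  [r, r90, r180, r270, f90, f180, f270, f]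

-- ===== PRECONDITION & SPEC =====
def Spec_make_rules (grid : List String) (out : List (List String)) : Prop := out = make_rules_alt grid
instance (grid : List String) (out : List (List String)) : Decidable (Spec_make_rules grid out) := by unfold Spec_make_rules; infer_instance

-- ===== CLAIM (what is proved, stated in full; the proofs are below) =====
def Claim_equal_make_rules : Prop := ∀ (grid : List String), Dom_make_rules grid → Spec_make_rules grid (make_rules grid)

-- ===== LEMMAS AND PROOFS =====

-- char-level rotate: what rotateA does to the underlying char matrix
def rotC (m : List (List Char)) : List (List Char) := pvZip m.reverse

-- rectangular a×b char matrix
def RectC (m : List (List Char)) (a b : Nat) : Prop :=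
  m.length = a ∧ ∀ row ∈ m, row.length = b

-- canonical table form and its cell accessor
def mC (a b : Nat) (f : Nat → Nat → Char) : List (List Char) :=
  (List.range a).map (fun i => (List.range b).map (fun j => f i j))

def elC (m : List (List Char)) (i j : Nat) : Char := (m.getD i []).getD j ' '

theorem rectC_mC (a b : Nat) (f : Nat → Nat → Char) : RectC (mC a b f) a b := by
  constructor
  · simp [mC]
  · intro row hrow
    simp only [mC, List.mem_map, List.mem_range] at hrow
    obtain ⟨i, _, rfl⟩ := hrow
    simp

theorem elC_mC {a b i j : Nat} (f : Nat → Nat → Char) (hi : i < a) (hj : j < b) :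
    elC (mC a b f) i j = f i j := by
  simp [elC, mC, List.getD, hi, hj]

theorem mC_congr {a b : Nat} {f g : Nat → Nat → Char}
    (h : ∀ i < a, ∀ j < b, f i j = g i j) : mC a b f = mC a b g := by
  unfold mC
  apply List.map_congr_left
  intro i hi
  apply List.map_congr_left
  intro j hj
  exact h i (List.mem_range.mp hi) j (List.mem_range.mp hj)

theorem minLen_eq {m : List (List Char)} {a b : Nat} (h : RectC m a b) (ha : 1 ≤ a) :
    pvMinLen m = b := by
  obtain ⟨hl, hr⟩ := h
  cases m with
  | nil => simp at hl; omega
  | cons r rs =>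
    have hrb : r.length = b := hr r (by simp)
    have : ∀ l ∈ rs, l.length = b := fun l hl' => hr l (by simp [hl'])
    simp only [pvMinLen, hrb]
    clear hl hr hrb
    induction rs with
    | nil => rfl
    | cons x xs ih =>
      have hx : x.length = b := this x (by simp)
      simp only [List.foldl_cons, hx, min_self]
      exact ih (fun l hl' => this l (by simp [hl']))

theorem pvZip_rect (m : List (List Char)) : RectC (pvZip m) (pvMinLen m) m.length := by
  constructor
  · simp [pvZip]
  · intro row hrow
    simp only [pvZip, List.mem_map, List.mem_range] at hrow
    obtain ⟨i, _, rfl⟩ := hrow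
    simp

theorem rect_reverse {m : List (List Char)} {a b : Nat} (h : RectC m a b) :
    RectC m.reverse a b := by
  obtain ⟨hl, hr⟩ := h
  exact ⟨by simp [hl], fun row hrow => hr row (by simpa using hrow)⟩

theorem rect_flip180 {m : List (List Char)} {a b : Nat} (h : RectC m a b) :
    RectC (m.reverse.map List.reverse) a b := by
  obtain ⟨hl, hr⟩ := h
  constructor
  · simp [hl]
  · intro row hrow
    simp only [List.mem_map, List.mem_reverse] at hrow
    obtain ⟨r, hrm, rfl⟩ := hrow
    simpa using hr r hrm

theorem rotC_mC {m : List (List Char)} {a b : Nat} (h : RectC m a b) (ha : 1 ≤ a) :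
    rotC m = mC b a (fun i j => elC m (a - 1 - j) i) := by
  have hml : m.length = a := h.1
  have hrev : RectC m.reverse a b := rect_reverse h
  have hmin : pvMinLen m.reverse = b := minLen_eq hrev ha
  unfold rotC pvZip mC
  rw [hmin]
  apply List.map_congr_left
  intro i _
  apply List.ext_getElem
  · simp [hml]
  · intro j hj1 hj2
    have hja : j < a := by simpa using hj2
    simp only [List.getElem_map, List.getElem_range, List.getElem_reverse]
    have hidx : m.length - 1 - j = a - 1 - j := by omega
    simp [elC, List.getD, (by omega : a - 1 - j < m.length), hidx]

theorem flip180_mC {m : List (List Char)} {a b : Nat} (h : RectC m a b) :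
    m.reverse.map List.reverse = mC a b (fun i j => elC m (a - 1 - i) (b - 1 - j)) := by
  have hml : m.length = a := h.1
  apply List.ext_getElem
  · simp [mC, hml]
  · intro i h1 h2
    have hia : i < a := by simpa [hml] using h1
    have him : a - 1 - i < m.length := by omega
    simp only [List.getElem_map, List.getElem_reverse, mC, List.getElem_range]
    have hidx : m.length - 1 - i = a - 1 - i := by omega
    simp only [hidx]
    have hrow : (m[a - 1 - i]'him).length = b := h.2 _ (List.getElem_mem him)
    apply List.ext_getElem
    · simp [hrow]
    · intro j hj1 hj2
      have hjb : j < b := by simpa using hj2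
      simp only [List.getElem_map, List.getElem_range, List.getElem_reverse, hrow]
      simp [elC, List.getD, him,
        (show b - 1 - j < (m[a - 1 - i]'him).length by omega)]

theorem zipRev_mC {m : List (List Char)} {a b : Nat} (h : RectC m a b) (ha : 1 ≤ a) :
    (pvZip m).reverse = mC b a (fun i j => elC m j (b - 1 - i)) := by
  have hml : m.length = a := h.1
  have hmin : pvMinLen m = b := minLen_eq h ha
  apply List.ext_getElem
  · simp [pvZip, mC, hmin]
  · intro i h1 h2
    have hib : i < b := by simpa [mC] using h2
    simp only [List.getElem_reverse, pvZip, List.length_map, List.length_range, hmin,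
      List.getElem_map, List.getElem_range, mC]
    apply List.ext_getElem
    · simp [hml]
    · intro j hj1 hj2
      have hja : j < a := by simpa using hj2
      simp only [List.getElem_map, List.getElem_range]
      simp [elC, List.getD, (show j < m.length by omega)]

theorem rotC2_eq {m : List (List Char)} {a b : Nat} (h : RectC m a b)
    (ha : 1 ≤ a) (hb : 1 ≤ b) :
    rotC (rotC m) = m.reverse.map List.reverse := by
  rw [rotC_mC h ha, rotC_mC (rectC_mC b a _) hb, flip180_mC h]
  apply mC_congr
  intro i hi j hj
  rw [elC_mC _ (by omega) hi]

theorem rotC3_eq {m : List (List Char)} {a b : Nat} (h : RectC m a b)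
    (ha : 1 ≤ a) (hb : 1 ≤ b) :
    rotC (rotC (rotC m)) = (pvZip m).reverse := by
  rw [rotC2_eq h ha hb, flip180_mC h, rotC_mC (rectC_mC a b _) ha, zipRev_mC h ha]
  apply mC_congr
  intro i hi j hj
  rw [elC_mC _ (by omega) hi]
  congr 1
  omega

theorem rotC4_eq {m : List (List Char)} {a b : Nat} (h : RectC m a b)
    (ha : 1 ≤ a) (hb : 1 ≤ b) :
    rotC (rotC (rotC (rotC m))) = m := by
  rw [rotC2_eq h ha hb, rotC2_eq (rect_flip180 h) ha hb]
  simp [List.map_reverse, List.map_map]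

-- A's two loops, unrolled to the eight rotateA/flipA applications, in msk form
theorem A_eval (grid : List String) :
    make_rules grid =
      [(rotC (grid.map String.toList)).map String.ofList,
       (rotC (rotC (grid.map String.toList))).map String.ofList,
       (rotC (rotC (rotC (grid.map String.toList)))).map String.ofList,
       (rotC (rotC (rotC (rotC (grid.map String.toList))))).map String.ofList,
       (rotC ((rotC (rotC (rotC (rotC (grid.map String.toList))))).map List.reverse)).map String.ofList,
       (rotC (rotC ((rotC (rotC (rotC (rotC (grid.map String.toList))))).map List.reverse))).map String.ofList,
       (rotC (rotC (rotC ((rotC (rotC (rotC (rotC (grid.map String.toList))))).map List.reverse)))).map String.ofList,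
       (rotC (rotC (rotC (rotC ((rotC (rotC (rotC (rotC (grid.map String.toList))))).map List.reverse))))).map String.ofList] := by
  have hr : List.range 4 = [0, 1, 2, 3] := rfl
  unfold make_rules
  simp only [hr, List.foldl_cons, List.foldl_nil]
  simp [rotateA, flipA, rotC, List.map_reverse, List.map_map, Function.comp_def,
    String.toList_ofList]

-- B's eight closed forms, in msk form
theorem B_eval (grid : List String) :
    make_rules_alt grid =
      [(rotC (grid.map String.toList)).map String.ofList,
       (rotC (rotC (grid.map String.toList))).map String.ofList,
       ((rotC (grid.map String.toList)).reverse.map List.reverse).map String.ofList,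
       ((pvZip (rotC (grid.map String.toList))).reverse).map String.ofList,
       (rotC (((pvZip (rotC (grid.map String.toList))).reverse).map List.reverse)).map String.ofList,
       ((((pvZip (rotC (grid.map String.toList))).reverse).map List.reverse).reverse.map List.reverse).map String.ofList,
       ((pvZip (((pvZip (rotC (grid.map String.toList))).reverse).map List.reverse)).reverse).map String.ofList,
       (((pvZip (rotC (grid.map String.toList))).reverse).map List.reverse).map String.ofList] := by
  unfold make_rules_alt
  simp [rotC, List.map_reverse, List.map_map, Function.comp_def, String.toList_ofList]

-- ===== VERDICT (by name: the statement is the Claim_ definition above) =====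
theorem make_rules_spec : Claim_equal_make_rules := by
  intro grid _
  show make_rules grid = make_rules_alt grid
  rw [A_eval, B_eval]
  set rc := rotC (grid.map String.toList) with hrc_def
  by_cases hrc : rc = []
  · rw [hrc]
    simp [rotC, pvZip, pvMinLen]
  · -- rc is a nonempty rectangular matrix with nonempty rows
    set a := pvMinLen ((grid.map String.toList).reverse) with ha_def
    set b := ((grid.map String.toList).reverse).length with hb_def
    have hrect0 : RectC rc a b := by
      rw [hrc_def, rotC]; exact pvZip_rect _
    have ha : 1 ≤ a := by
      rcases Nat.eq_zero_or_pos a with h0 | h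
      · exfalso; apply hrc
        have := hrect0.1
        rw [h0] at this
        exact List.length_eq_zero_iff.mp this
      · exact h
    have hb : 1 ≤ b := by
      rcases Nat.eq_zero_or_pos b with h0 | h
      · exfalso
        have hnil : (grid.map String.toList).reverse = [] := by
          exact List.length_eq_zero_iff.mp (by omega)
        apply hrc
        rw [hrc_def, rotC, hnil]
        rfl
      · exact h
    have hZ : RectC (pvZip rc) b a := by
      have := pvZip_rect rc
      rwa [minLen_eq hrect0 ha, hrect0.1] at this
    have hfc : RectC (((pvZip rc).reverse).map List.reverse) b a := rect_flip180 hZ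
    have e2 := rotC2_eq hrect0 ha hb
    have e3 := rotC3_eq hrect0 ha hb
    have e6 := rotC2_eq hfc hb ha
    have e7 := rotC3_eq hfc hb ha
    have e8 := rotC4_eq hfc hb ha
    rw [e3, e2, e8, e7, e6]
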